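-- pv_equiv track=rewrite | github.com/programming-basics-kse/assignment-3-lil-uzi-vert-just-wanna-rock | main.py | medals_to_str
-- ===== SOURCE A (Python) =====
-- def medals_to_str(medals_out: list[list], output_file_name: str) -> str:
--     output_content = ''
--
--     if len(medals_out) == 0:
--         output_content = 'No medalists found\nPlease enter the correct country or year.'
--     else:
--         for i in range(len(medals_out)):
--             output_content += f'{i+1}. '
--             output_content += f'{medals_out[i][0]} - {medals_out[i][1]} - {medals_out[i][2]}'
--             output_content += '\n'
--         gold = 0
--         silver = 0
--         bronze = 0
--         for i in medals_out:
--             gold += i.count('Gold')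
--             silver += i.count('Silver')
--             bronze += i.count('Bronze')
--         output_content += f'Gold: {gold}\n'
--         output_content += f'Silver: {silver}\n'
--         output_content += f'Bronze: {bronze}'
--
--     return output_content
-- ===== SOURCE B (Python) =====
-- def _go(rest, i, g, s, b):
--     if not rest:
--         return f'Gold: {g}\nSilver: {s}\nBronze: {b}'
--     row = rest[0]
--     line = f'{i}. {row[0]} - {row[1]} - {row[2]}\n'
--     for x in row:
--         g += (x == 'Gold')
--         s += (x == 'Silver')
--         b += (x == 'Bronze')
--     return line + _go(rest[1:], i + 1, g, s, b)
--
--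
-- def medals_to_str(medals_out: list[list], output_file_name: str) -> str:
--     if not medals_out:
--         return 'No medalists found\nPlease enter the correct country or year.'
--     return _go(medals_out, 1, 0, 0, 0)
-- ===== Notes on version B (the rewrite author's own statement) =====
-- stated objective: alternative
-- what changed: A makes two staged passes (an index loop concatenating rows, then a second loop calling row.count three times per row); B is a single recursive pass over the list that emits each numbered row and tallies Gold/Silver/Bronze element-by-element in one accumulator as it descends.
-- outside the precondition, e.g. on medals_to_str([['USA', '2020']], 'f'): A raises IndexError, B raises IndexError
import Mathlib
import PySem

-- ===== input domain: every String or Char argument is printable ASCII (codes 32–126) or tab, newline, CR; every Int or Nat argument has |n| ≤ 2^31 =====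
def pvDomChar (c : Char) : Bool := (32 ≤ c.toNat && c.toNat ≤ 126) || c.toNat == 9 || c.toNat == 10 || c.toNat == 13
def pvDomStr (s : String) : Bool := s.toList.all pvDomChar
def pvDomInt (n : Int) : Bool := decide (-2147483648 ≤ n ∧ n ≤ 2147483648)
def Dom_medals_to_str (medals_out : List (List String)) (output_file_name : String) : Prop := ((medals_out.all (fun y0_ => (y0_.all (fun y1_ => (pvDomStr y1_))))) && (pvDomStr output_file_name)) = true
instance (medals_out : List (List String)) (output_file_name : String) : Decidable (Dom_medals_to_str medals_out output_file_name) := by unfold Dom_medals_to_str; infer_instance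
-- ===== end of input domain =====

-- B replaces A's two staged loops (index loop for rows, then three per-row .count scans) by a
-- single recursive pass that emits each row and tallies the three medals element-by-element
-- as it goes (objective: alternative decomposition, same cost).

-- ===== PORT A =====
def medals_to_str (medals_out : List (List String)) (output_file_name : String) : String :=
  if medals_out.length == 0 then
    "No medalists found\nPlease enter the correct country or year."
  else
    let oc := (PySem.List.pyRange 0 (medals_out.length : Int) 1).foldl
      (fun s i =>
        s ++ (PySem.Int.toStr (i + 1) ++ ". ")
          ++ (PySem.List.pyGetD (PySem.List.pyGetD medals_out i []) 0 "" ++ " - "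
                ++ PySem.List.pyGetD (PySem.List.pyGetD medals_out i []) 1 "" ++ " - "
                ++ PySem.List.pyGetD (PySem.List.pyGetD medals_out i []) 2 "")
          ++ "\n") ""
    let counts := medals_out.foldl
      (fun (acc : Int × Int × Int) r =>
        (acc.1 + (PySem.List.count r "Gold" : Int),
         acc.2.1 + (PySem.List.count r "Silver" : Int),
         acc.2.2 + (PySem.List.count r "Bronze" : Int))) (0, 0, 0)
    oc ++ ("Gold: " ++ PySem.Int.toStr counts.1 ++ "\n")
       ++ ("Silver: " ++ PySem.Int.toStr counts.2.1 ++ "\n")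
       ++ ("Bronze: " ++ PySem.Int.toStr counts.2.2)

-- ===== PORT B =====
-- _go in Source B: one recursive pass emitting the numbered row and tallying medals as it goes
def pvGo : List (List String) → Int → Int → Int → Int → String
  | [], _, g, s, b =>
      "Gold: " ++ PySem.Int.toStr g ++ "\nSilver: " ++ PySem.Int.toStr s
        ++ "\nBronze: " ++ PySem.Int.toStr b
  | row :: t, i, g, s, b =>
      let line := PySem.Int.toStr i ++ ". " ++ PySem.List.pyGetD row 0 "" ++ " - "
        ++ PySem.List.pyGetD row 1 "" ++ " - " ++ PySem.List.pyGetD row 2 "" ++ "\n"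
      let c := row.foldl
        (fun (a : Int × Int × Int) x =>
          (a.1 + (if x == "Gold" then 1 else 0),
           a.2.1 + (if x == "Silver" then 1 else 0),
           a.2.2 + (if x == "Bronze" then 1 else 0))) (g, s, b)
      line ++ pvGo t (i + 1) c.1 c.2.1 c.2.2

def medals_to_str_alt (medals_out : List (List String)) (output_file_name : String) : String :=
  if medals_out = [] then
    "No medalists found\nPlease enter the correct country or year."
  else
    pvGo medals_out 1 0 0 0

-- ===== PRECONDITION & SPEC =====
-- Pre_ excludes inputs containing a row with fewer than 3 entries: on those A (and B) raise IndexError at row[2].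
def Pre_medals_to_str (medals_out : List (List String)) (output_file_name : String) : Prop :=
  ∀ r ∈ medals_out, 3 ≤ r.length
instance (medals_out : List (List String)) (output_file_name : String) : Decidable (Pre_medals_to_str medals_out output_file_name) := by unfold Pre_medals_to_str; infer_instance
def pvWitness_medals_to_str : List (List String) × String :=
  ([["USA", "2020", "Gold"], ["UKR", "2021", "Silver"]], "out.txt")
def Spec_medals_to_str (medals_out : List (List String)) (output_file_name : String) (out : String) : Prop := out = medals_to_str_alt medals_out output_file_name
instance (medals_out : List (List String)) (output_file_name : String) (out : String) : Decidable (Spec_medals_to_str medals_out output_file_name out) := by unfold Spec_medals_to_str; infer_instance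

-- ===== CLAIM (what is proved, stated in full; the proofs are below) =====
def Claim_equal_medals_to_str : Prop := ∀ (medals_out : List (List String)) (output_file_name : String), Dom_medals_to_str medals_out output_file_name → Pre_medals_to_str medals_out output_file_name → Spec_medals_to_str medals_out output_file_name (medals_to_str medals_out output_file_name)

-- ===== LEMMAS AND PROOFS =====

-- the text of one numbered row
def pvRow (i : Int) (row : List String) : String :=
  PySem.Int.toStr i ++ ". " ++ PySem.List.pyGetD row 0 "" ++ " - "
    ++ PySem.List.pyGetD row 1 "" ++ " - " ++ PySem.List.pyGetD row 2 "" ++ "\n"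

-- ''.join over a cons
theorem pv_join_cons (x : String) (l : List String) :
    PySem.Str.join "" (x :: l) = x ++ PySem.Str.join "" l := by
  simp [PySem.Str.join, PySem.Chars.join, List.intercalate]
  induction l with
  | nil => simp
  | cons y t ih => simp at *

-- ''.join distributes over appending one more piece
theorem pv_join_append (l : List String) (x : String) :
    PySem.Str.join "" (l ++ [x]) = PySem.Str.join "" l ++ x := by
  induction l with
  | nil =>
    simp only [List.nil_append]
    rw [pv_join_cons]
    simp [show PySem.Str.join "" ([] : List String) = "" from by decide]
  | cons y t ih => simp only [List.cons_append, pv_join_cons, ih, String.append_assoc]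

-- Python indexing into an appended list, index inside the left part
theorem pv_getD_app_left (xs ys : List (List String)) (i : Int) (h0 : 0 ≤ i)
    (h : i < (xs.length : Int)) (d : List String) :
    PySem.List.pyGetD (xs ++ ys) i d = PySem.List.pyGetD xs i d := by
  obtain ⟨n, rfl⟩ := Int.eq_ofNat_of_zero_le h0
  rw [PySem.List.pyGetD_natCast, PySem.List.pyGetD_natCast]
  have hn : n < xs.length := by exact_mod_cast h
  simp [List.getD_eq_getElem?_getD, List.getElem?_append_left hn]

-- Python indexing into an appended list at the old length
theorem pv_getD_app_len (xs : List (List String)) (r d : List String) :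
    PySem.List.pyGetD (xs ++ [r]) (xs.length : Int) d = r := by
  rw [PySem.List.pyGetD_natCast]
  simp [List.getD_eq_getElem?_getD]

-- A's numbered-rows loop equals the join of the per-row texts over enumerate
theorem pv_rows_eq (ms : List (List String)) :
    (PySem.List.pyRange 0 (ms.length : Int) 1).foldl
      (fun s i =>
        s ++ (PySem.Int.toStr (i + 1) ++ ". ")
          ++ (PySem.List.pyGetD (PySem.List.pyGetD ms i []) 0 "" ++ " - "
                ++ PySem.List.pyGetD (PySem.List.pyGetD ms i []) 1 "" ++ " - "
                ++ PySem.List.pyGetD (PySem.List.pyGetD ms i []) 2 "")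
          ++ "\n") ""
    = PySem.Str.join "" ((PySem.List.enumerate ms 1).map (fun p => pvRow p.1 p.2)) := by
  induction ms using List.reverseRecOn with
  | nil => rfl
  | append_singleton xs r ih =>
    have hlen : ((xs ++ [r]).length : Int) = (xs.length : Int) + 1 := by
      simp [List.length_append]
    rw [hlen, PySem.List.pyRange_one_succ_right (by positivity), List.foldl_append]
    have hc : (PySem.List.pyRange 0 (xs.length : Int)).foldl
      (fun s i =>
        s ++ (PySem.Int.toStr (i + 1) ++ ". ")
          ++ (PySem.List.pyGetD (PySem.List.pyGetD (xs ++ [r]) i []) 0 "" ++ " - "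
                ++ PySem.List.pyGetD (PySem.List.pyGetD (xs ++ [r]) i []) 1 "" ++ " - "
                ++ PySem.List.pyGetD (PySem.List.pyGetD (xs ++ [r]) i []) 2 "")
          ++ "\n") ""
      = (PySem.List.pyRange 0 (xs.length : Int)).foldl
      (fun s i =>
        s ++ (PySem.Int.toStr (i + 1) ++ ". ")
          ++ (PySem.List.pyGetD (PySem.List.pyGetD xs i []) 0 "" ++ " - "
                ++ PySem.List.pyGetD (PySem.List.pyGetD xs i []) 1 "" ++ " - "
                ++ PySem.List.pyGetD (PySem.List.pyGetD xs i []) 2 "")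
          ++ "\n") "" := by
      apply PySem.List.foldl_congr_mem
      intro acc i hi
      rw [PySem.List.mem_pyRange_one] at hi
      rw [pv_getD_app_left xs [r] i hi.1 hi.2]
    rw [hc, ih, PySem.List.enumerate_append, List.map_append]
    simp only [PySem.List.enumerate_cons, PySem.List.enumerate_nil, List.map_cons, List.map_nil]
    rw [pv_join_append]
    simp only [List.foldl_cons, List.foldl_nil]
    rw [pv_getD_app_len]
    simp only [pvRow, String.append_assoc]
    rw [Int.add_comm 1 (xs.length : Int)]

-- A's triple accumulating loop computed in closed form over the flattened list
theorem pv_counts_eq (ms : List (List String)) (a b c : Int) :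
    ms.foldl
      (fun (acc : Int × Int × Int) r =>
        (acc.1 + (PySem.List.count r "Gold" : Int),
         acc.2.1 + (PySem.List.count r "Silver" : Int),
         acc.2.2 + (PySem.List.count r "Bronze" : Int))) (a, b, c)
    = (a + ((ms.flatMap (fun row => row)).count "Gold" : Int),
       b + ((ms.flatMap (fun row => row)).count "Silver" : Int),
       c + ((ms.flatMap (fun row => row)).count "Bronze" : Int)) := by
  induction ms generalizing a b c with
  | nil => simp
  | cons r t ih =>
    simp only [List.foldl_cons, List.flatMap_cons]
    rw [ih]
    simp only [PySem.List.count_eq, List.count_append, Prod.mk.injEq]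
    push_cast
    omega

-- B's per-row element tally computed in closed form
theorem pv_row_tally (row : List String) (g s b : Int) :
    row.foldl
      (fun (a : Int × Int × Int) x =>
        (a.1 + (if x == "Gold" then 1 else 0),
         a.2.1 + (if x == "Silver" then 1 else 0),
         a.2.2 + (if x == "Bronze" then 1 else 0))) (g, s, b)
    = (g + (row.count "Gold" : Int), s + (row.count "Silver" : Int),
       b + (row.count "Bronze" : Int)) := by
  induction row generalizing g s b with
  | nil => simp
  | cons x t ih =>
    simp only [List.foldl_cons, List.count_cons, ih, Prod.mk.injEq]
    constructor
    · rcases instDecidableEqString x "Gold" with h | h <;> simp [h] <;> push_cast <;> omega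
    constructor
    · rcases instDecidableEqString x "Silver" with h | h <;> simp [h] <;> push_cast <;> omega
    · rcases instDecidableEqString x "Bronze" with h | h <;> simp [h] <;> push_cast <;> omega

-- literal splits used to align the two builds of the trailer
theorem pv_split_silver (x : String) : "\nSilver: " ++ x = "\n" ++ ("Silver: " ++ x) := by
  rw [← String.append_assoc]; rfl
theorem pv_split_bronze (x : String) : "\nBronze: " ++ x = "\n" ++ ("Bronze: " ++ x) := by
  rw [← String.append_assoc]; rfl

-- characterisation of B's recursion: rows so far joined, trailer with accumulated tallies
theorem pv_go_eq (ms : List (List String)) (i g s b : Int) :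
    pvGo ms i g s b
    = PySem.Str.join "" ((PySem.List.enumerate ms i).map (fun p => pvRow p.1 p.2))
      ++ ("Gold: " ++ PySem.Int.toStr (g + ((ms.flatMap (fun row => row)).count "Gold" : Int)) ++ "\n")
      ++ ("Silver: " ++ PySem.Int.toStr (s + ((ms.flatMap (fun row => row)).count "Silver" : Int)) ++ "\n")
      ++ ("Bronze: " ++ PySem.Int.toStr (b + ((ms.flatMap (fun row => row)).count "Bronze" : Int))) := by
  induction ms generalizing i g s b with
  | nil =>
    have hj : PySem.Str.join "" ([] : List String) = "" := by decide
    simp only [pvGo, PySem.List.enumerate_nil, List.map_nil, List.flatMap_nil, List.count_nil,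
      Nat.cast_zero, add_zero, hj, String.append_assoc, pv_split_silver, pv_split_bronze]
    rfl
  | cons row t ih =>
    simp only [pvGo, pv_row_tally, PySem.List.enumerate_cons, List.map_cons, pv_join_cons,
      List.flatMap_cons, List.count_append, ih]
    simp only [pvRow, String.append_assoc, Nat.cast_add, add_assoc]

-- ===== VERDICT (by name: the statement is the Claim_ definition above) =====
theorem medals_to_str_spec : Claim_equal_medals_to_str := by
  intro ms file _hdom _hpre
  unfold Spec_medals_to_str medals_to_str medals_to_str_alt
  by_cases hms : ms = []
  · subst hms; rfl
  · have h1 : (ms.length == 0) = false := by simp [hms]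
    simp only [h1, Bool.false_eq_true, if_false, if_neg hms]
    rw [pv_rows_eq ms, pv_counts_eq ms 0 0 0, pv_go_eq ms 1 0 0 0]
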